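-- pv_equiv track=rewrite | github.com/adria-boada/ephemeral | src/ephemeral/reading.py | combinations_populations
-- ===== SOURCE A (Python) =====
-- def combinations_populations(pop_labels: list):
--     """
--     Compute possible combinations of a single or a pair of populations, in order
--     to compute all possible 1D and 2D SFS.
--     """
--
--     def combine(arr):
--         if len(arr) == 0: return [[]]
--         combs = []
--         for c in combine(arr[1:]):
--             combs += [c, c + [arr[0]]]
--         return combs
--     # Only combinations of one or two items (pops) allowed.
--     pop_combinations = [c for c in combine(pop_labels)
--                         if len(c) == 1 or len(c) == 2]
--
--     return {tuple(combo): list() for combo in pop_combinations}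
-- ===== SOURCE B (Python) =====
-- def combinations_populations(pop_labels: list):
--     """
--     Directly enumerate the size-1 and size-2 combinations in the order the
--     recursive subset enumeration would emit them: for each label, its
--     singleton, then its pair with every earlier label.
--     """
--     result = {}
--     seen = []
--     for x in pop_labels:
--         result[(x,)] = []
--         for y in seen:
--             result[(x, y)] = []
--         seen.append(x)
--     return result
-- ===== Notes on version B (the rewrite author's own statement) =====
-- stated objective: faster
-- what changed: B replaces the exponential recursive enumeration of all 2^n subsets (then filtering for sizes 1 and 2) with a direct nested loop that emits each singleton and each pair with earlier labels in the same order.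
import Mathlib
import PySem

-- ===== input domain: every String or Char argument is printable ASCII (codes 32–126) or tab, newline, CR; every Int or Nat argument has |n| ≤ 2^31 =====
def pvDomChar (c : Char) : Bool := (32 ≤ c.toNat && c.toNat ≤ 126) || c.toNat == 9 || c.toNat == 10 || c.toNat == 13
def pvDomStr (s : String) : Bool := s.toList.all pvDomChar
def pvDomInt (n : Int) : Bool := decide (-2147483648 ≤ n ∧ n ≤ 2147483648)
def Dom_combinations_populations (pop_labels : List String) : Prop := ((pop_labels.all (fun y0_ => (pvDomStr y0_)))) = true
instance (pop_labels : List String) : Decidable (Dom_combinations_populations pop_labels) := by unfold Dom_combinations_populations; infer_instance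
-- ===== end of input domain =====

-- B replaces A's exponential enumeration of all 2^n subsets (filtered to sizes 1 and 2)
-- with a direct quadratic nested loop emitting the same keys in the same order (objective: faster).

-- ===== PORT A =====
-- inner helper `combine`: recursive enumeration of all subsets
def pvCombine (arr : List String) : List (List String) :=
  match arr with
  | [] => [[]]
  | x :: xs => (pvCombine xs).foldl (fun combs c => combs ++ [c, c ++ [x]]) []

def combinations_populations (pop_labels : List String) : List (List String × List String) :=
  -- filter to sizes 1 and 2, then the dict comprehension {tuple(combo): list()}
  (((pvCombine pop_labels).filter (fun c => c.length == 1 || c.length == 2)).foldl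
    (fun d combo => d.insert combo ([] : List String))
    (PySem.Dict.empty : PySem.Dict (List String) (List String))).items

-- ===== PORT B =====
-- nested loop: for each label x, insert (x,), then (x, y) for every earlier y
def pvBuild (d : PySem.Dict (List String) (List String)) (seen : List String) :
    List String → PySem.Dict (List String) (List String)
  | [] => d
  | x :: xs =>
      pvBuild (seen.foldl (fun d' y => d'.insert [x, y] []) (d.insert [x] [])) (seen ++ [x]) xs

def combinations_populations_alt (pop_labels : List String) : List (List String × List String) :=
  (pvBuild PySem.Dict.empty [] pop_labels).items

-- ===== PRECONDITION & SPEC =====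
def Spec_combinations_populations (pop_labels : List String) (out : List (List String × List String)) : Prop := out = combinations_populations_alt pop_labels
instance (pop_labels : List String) (out : List (List String × List String)) : Decidable (Spec_combinations_populations pop_labels out) := by unfold Spec_combinations_populations; infer_instance

-- ===== CLAIM (what is proved, stated in full; the proofs are below) =====
def Claim_equal_combinations_populations : Prop := ∀ (pop_labels : List String), Dom_combinations_populations pop_labels → Spec_combinations_populations pop_labels (combinations_populations pop_labels)

-- ===== LEMMAS AND PROOFS =====

-- the key sequence B's nested loop inserts
def pvKeys (seen : List String) : List String → List (List String)
  | [] => []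
  | x :: xs => ([x] :: seen.map (fun y => [x, y])) ++ pvKeys (seen ++ [x]) xs

-- insert c ++ [a] right after every singleton c
def pvIns (a : String) : List (List String) → List (List String)
  | [] => []
  | c :: rest => if c.length = 1 then c :: (c ++ [a]) :: pvIns a rest else c :: pvIns a rest

theorem pvCombine_shape (xs : List String) :
    ∃ rest, pvCombine xs = [] :: rest ∧ ∀ c ∈ rest, c ≠ [] := by
  induction xs with
  | nil => exact ⟨[], rfl, by simp⟩
  | cons x xs ih =>
    obtain ⟨r, hr, hne⟩ := ih
    refine ⟨[x] :: r.flatMap (fun c => [c, c ++ [x]]), ?_, ?_⟩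
    · show (pvCombine xs).foldl (fun combs c => combs ++ [c, c ++ [x]]) [] = _
      rw [hr]
      rw [PySem.List.foldl_append_eq_flatMap]
      simp
    · intro c hc
      simp only [List.mem_cons, List.mem_flatMap, List.not_mem_nil, or_false] at hc
      rcases hc with h | ⟨c', hc', h | h⟩
      · simp [h]
      · exact h ▸ hne c' hc'
      · simp [h]

theorem pvFlat_filter (x : String) (L : List (List String)) (h : ∀ c ∈ L, c ≠ []) :
    L.flatMap (fun c => [c, c ++ [x]].filter (fun c => c.length == 1 || c.length == 2)) =
      pvIns x (L.filter (fun c => c.length == 1 || c.length == 2)) := by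
  induction L with
  | nil => rfl
  | cons c L ih =>
    have hc : c ≠ [] := h c (by simp)
    have hrest := ih (fun c hm => h c (by simp [hm]))
    match c, hc with
    | [z], _ =>
      simp only [List.flatMap_cons, hrest]
      simp [pvIns, List.filter]
    | [z, w], _ =>
      simp only [List.flatMap_cons, hrest]
      simp [pvIns, List.filter]
    | z :: w :: v :: u, _ =>
      simp only [List.flatMap_cons, hrest]
      simp [List.filter]

theorem filter_pvCombine_cons (x : String) (xs : List String) :
    (pvCombine (x :: xs)).filter (fun c => c.length == 1 || c.length == 2) =
      [x] :: pvIns x ((pvCombine xs).filter (fun c => c.length == 1 || c.length == 2)) := by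
  obtain ⟨r, hr, hne⟩ := pvCombine_shape xs
  have h1 : pvCombine (x :: xs) = ([] : List String) :: [x] :: r.flatMap (fun c => [c, c ++ [x]]) := by
    show (pvCombine xs).foldl (fun combs c => combs ++ [c, c ++ [x]]) [] = _
    rw [hr, PySem.List.foldl_append_eq_flatMap]
    simp
  rw [h1, hr]
  simp only [List.filter_cons]
  have hflat : ∀ (r : List (List String)), (r.flatMap (fun c => [c, c ++ [x]])).filter (fun c => c.length == 1 || c.length == 2) =
      r.flatMap (fun c => [c, c ++ [x]].filter (fun c => c.length == 1 || c.length == 2)) := by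
    intro r
    induction r with
    | nil => rfl
    | cons c r ihr =>
      rw [List.flatMap_cons, List.flatMap_cons, List.filter_append, ihr]
  simp only [List.length_nil, List.length_cons]
  rw [hflat r, pvFlat_filter x r hne]
  simp

theorem pvIns_append (a : String) (l₁ l₂ : List (List String)) :
    pvIns a (l₁ ++ l₂) = pvIns a l₁ ++ pvIns a l₂ := by
  induction l₁ with
  | nil => rfl
  | cons c l₁ ih =>
    simp only [List.cons_append, pvIns, ih]
    split_ifs <;> simp

theorem pvIns_map_pair (a z : String) (s : List String) :
    pvIns a (s.map (fun y => [z, y])) = s.map (fun y => [z, y]) := by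
  induction s with
  | nil => rfl
  | cons y s ih => simp [pvIns, ih]

theorem pvKeys_cons_seen (a : String) (xs : List String) :
    ∀ s, pvKeys (a :: s) xs = pvIns a (pvKeys s xs) := by
  induction xs with
  | nil => intro s; rfl
  | cons x xs ih =>
    intro s
    show ([x] :: (a :: s).map (fun y => [x, y])) ++ pvKeys ((a :: s) ++ [x]) xs =
      pvIns a (([x] :: s.map (fun y => [x, y])) ++ pvKeys (s ++ [x]) xs)
    rw [show (a :: s) ++ [x] = a :: (s ++ [x]) from rfl, ih (s ++ [x])]
    rw [show ([x] :: s.map (fun y => [x, y])) ++ pvKeys (s ++ [x]) xs =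
      [x] :: (s.map (fun y => [x, y]) ++ pvKeys (s ++ [x]) xs) from rfl]
    simp only [pvIns, List.length_cons, List.length_nil]
    rw [pvIns_append, pvIns_map_pair]
    simp

theorem filter_pvCombine_eq_pvKeys (l : List String) :
    (pvCombine l).filter (fun c => c.length == 1 || c.length == 2) = pvKeys [] l := by
  induction l with
  | nil => rfl
  | cons x xs ih =>
    rw [filter_pvCombine_cons, ih, show ([x] : List String) = x :: [] from rfl,
      ← pvKeys_cons_seen x xs []]
    rfl

theorem pvBuild_eq_foldl (xs : List String) :
    ∀ (d : PySem.Dict (List String) (List String)) (seen : List String),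
      pvBuild d seen xs = (pvKeys seen xs).foldl (fun d k => d.insert k []) d := by
  induction xs with
  | nil => intro d seen; rfl
  | cons x xs ih =>
    intro d seen
    show pvBuild (seen.foldl (fun d' y => d'.insert [x, y] []) (d.insert [x] [])) (seen ++ [x]) xs = _
    rw [ih]
    simp only [pvKeys, List.foldl_append, List.foldl_cons, List.foldl_map]

-- ===== VERDICT (by name: the statement is the Claim_ definition above) =====
theorem combinations_populations_spec : Claim_equal_combinations_populations := by
  intro pop_labels _
  show combinations_populations pop_labels = combinations_populations_alt pop_labels
  unfold combinations_populations combinations_populations_alt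
  rw [filter_pvCombine_eq_pvKeys, pvBuild_eq_foldl]
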